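-- pv_equiv track=rewrite | github.com/Learninglemur/trade_parsing | brokers/symbol_enhancer.py | identify_potential_spac
-- ===== SOURCE A (Python) =====
-- def identify_potential_spac(description: str) -> bool:
--     """
--     Determine if a description likely refers to a SPAC based on common keywords and patterns
--
--     Args:
--         description: The security description text
--
--     Returns:
--         True if the description likely refers to a SPAC
--     """
--     if not description:
--         return False
--
--     # Convert to uppercase for case-insensitive matching
--     description_upper = description.upper()
--
--     # Common SPAC keywords and patterns
--     spac_keywords = [
--         "SPAC",
--         "ACQUISITION CORP",
--         "ACQUISITION HOLDINGS",
--         "CAPITAL CORP",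
--         "HOLDINGS CORP",
--         "MERGER",
--         "SPECIAL PURPOSE",
--         "BLANK CHECK",
--         "TECHNOLOGY PARTNERS",
--         "NEXTGEN ACQUISITION",
--         "CAPITAL INVESTMENT",
--         "UNIT",  # SPACs often trade as units initially
--         "WARRANT",  # SPACs have warrants
--         "CLASS A",  # SPACs often have Class A shares
--         "CL A"  # Abbreviated Class A
--     ]
--
--     # Check for known SPAC sponsors
--     spac_sponsors = [
--         "CHAMATH",
--         "SOCIAL CAPITAL",
--         "PERSHING SQUARE",
--         "DIAMOND EAGLE",
--         "CHURCHILL CAPITAL",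
--         "VECTOR ACQUISITION",
--         "REINVENT TECH",
--         "ATLAS CREST",
--         "HORIZON ACQUISITION",
--         "SOFTBANK"
--     ]
--
--     # Check if any SPAC keyword is in the description
--     for keyword in spac_keywords:
--         if keyword in description_upper:
--             return True
--
--     # Check if any SPAC sponsor is in the description
--     for sponsor in spac_sponsors:
--         if sponsor in description_upper:
--             return True
--
--     return False
-- ===== SOURCE B (Python) =====
-- # B: single position-major scan — walk the uppercased text once and test all
-- # keywords anchored at each position with startswith, instead of A's 25
-- # separate full-string substring searches.
--
-- _SPAC_TERMS = [
--     "SPAC", "ACQUISITION CORP", "ACQUISITION HOLDINGS", "CAPITAL CORP",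
--     "HOLDINGS CORP", "MERGER", "SPECIAL PURPOSE", "BLANK CHECK",
--     "TECHNOLOGY PARTNERS", "NEXTGEN ACQUISITION", "CAPITAL INVESTMENT",
--     "UNIT", "WARRANT", "CLASS A", "CL A",
--     "CHAMATH", "SOCIAL CAPITAL", "PERSHING SQUARE", "DIAMOND EAGLE",
--     "CHURCHILL CAPITAL", "VECTOR ACQUISITION", "REINVENT TECH",
--     "ATLAS CREST", "HORIZON ACQUISITION", "SOFTBANK",
-- ]
--
--
-- def identify_potential_spac(description: str) -> bool:
--     text = description.upper()
--     for i in range(len(text)):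
--         for term in _SPAC_TERMS:
--             if text.startswith(term, i):
--                 return True
--     return False
-- ===== Notes on version B (the rewrite author's own statement) =====
-- stated objective: alternative
-- what changed: B replaces A's keyword-major pass (25 independent full-string 'in' substring searches over two lists) by one position-major scan of the uppercased text that tests every keyword anchored at each position with startswith, with no empty-string guard.
import Mathlib
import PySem

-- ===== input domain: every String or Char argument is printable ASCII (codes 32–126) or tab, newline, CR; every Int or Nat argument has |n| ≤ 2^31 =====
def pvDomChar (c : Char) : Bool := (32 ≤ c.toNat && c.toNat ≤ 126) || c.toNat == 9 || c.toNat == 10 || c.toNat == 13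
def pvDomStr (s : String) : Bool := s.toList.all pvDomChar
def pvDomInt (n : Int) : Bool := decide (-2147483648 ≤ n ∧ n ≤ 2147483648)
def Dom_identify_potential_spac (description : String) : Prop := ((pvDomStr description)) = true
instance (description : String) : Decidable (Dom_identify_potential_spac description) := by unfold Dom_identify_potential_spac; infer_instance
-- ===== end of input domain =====

-- B replaces A's keyword-major pass (two loops of full-string substring searches) by one
-- position-major scan testing every keyword anchored at each position; return value only.

-- ===== PORT A =====
def spac_keywords : List String :=
  ["SPAC", "ACQUISITION CORP", "ACQUISITION HOLDINGS", "CAPITAL CORP", "HOLDINGS CORP", "MERGER", "SPECIAL PURPOSE", "BLANK CHECK", "TECHNOLOGY PARTNERS", "NEXTGEN ACQUISITION", "CAPITAL INVESTMENT", "UNIT", "WARRANT", "CLASS A", "CL A"]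

def spac_sponsors : List String :=
  ["CHAMATH", "SOCIAL CAPITAL", "PERSHING SQUARE", "DIAMOND EAGLE", "CHURCHILL CAPITAL", "VECTOR ACQUISITION", "REINVENT TECH", "ATLAS CREST", "HORIZON ACQUISITION", "SOFTBANK"]

-- 'for kw in L: if kw in description_upper: return True' is List.any over L
def identify_potential_spac (description : String) : Bool :=
  if description.toList.isEmpty then false
  else
    let description_upper := PySem.Str.upper description
    if spac_keywords.any (fun keyword => PySem.Str.isIn keyword description_upper) then true
    else if spac_sponsors.any (fun sponsor => PySem.Str.isIn sponsor description_upper) then true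
    else false

-- ===== PORT B =====
def spacTerms : List String :=
  ["SPAC", "ACQUISITION CORP", "ACQUISITION HOLDINGS", "CAPITAL CORP", "HOLDINGS CORP", "MERGER", "SPECIAL PURPOSE", "BLANK CHECK", "TECHNOLOGY PARTNERS", "NEXTGEN ACQUISITION", "CAPITAL INVESTMENT", "UNIT", "WARRANT", "CLASS A", "CL A", "CHAMATH", "SOCIAL CAPITAL", "PERSHING SQUARE", "DIAMOND EAGLE", "CHURCHILL CAPITAL", "VECTOR ACQUISITION", "REINVENT TECH", "ATLAS CREST", "HORIZON ACQUISITION", "SOFTBANK"]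

-- the position loop: 'for i in range(len(text)): …' = recursion over the suffixes of text
def spacScan (s : List Char) : Bool :=
  match s with
  | [] => false
  | _ :: t =>
      if spacTerms.any (fun term => PySem.Chars.startswith s term.toList) then true
      else spacScan t

def identify_potential_spac_alt (description : String) : Bool :=
  spacScan (PySem.Str.upper description).toList

-- ===== PRECONDITION & SPEC =====
def Spec_identify_potential_spac (description : String) (out : Bool) : Prop := out = identify_potential_spac_alt description
instance (description : String) (out : Bool) : Decidable (Spec_identify_potential_spac description out) := by unfold Spec_identify_potential_spac; infer_instance

-- ===== CLAIM (what is proved, stated in full; the proofs are below) =====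
def Claim_equal_identify_potential_spac : Prop := ∀ (description : String), Dom_identify_potential_spac description → Spec_identify_potential_spac description (identify_potential_spac description)

-- ===== LEMMAS AND PROOFS =====

-- 'sub in (c :: t)' = (sub anchored at position 0) or ('sub in t')
theorem spac_isIn_cons (sub : List Char) (c : Char) (t : List Char) :
    PySem.Chars.isIn sub (c :: t)
      = (PySem.Chars.startswith (c :: t) sub || PySem.Chars.isIn sub t) := by
  rcases h : PySem.Chars.startswith (c :: t) sub with _ | _
  · rcases h2 : PySem.Chars.isIn sub t with _ | _
    · simp only [Bool.or_false]
      rw [PySem.Chars.isIn_eq_false_iff]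
      intro hinf
      rcases List.infix_cons_iff.mp hinf with hp | hi
      · have := (PySem.Chars.startswith_iff (c :: t) sub).mpr hp
        rw [h] at this; exact Bool.false_ne_true this
      · exact (PySem.Chars.isIn_eq_false_iff sub t).mp h2 hi
    · simp only [Bool.or_true]
      rw [PySem.Chars.isIn_iff_infix]
      exact ((PySem.Chars.isIn_iff_infix sub t).mp h2).trans (List.suffix_cons c t).isInfix
  · simp only [Bool.true_or]
    rw [PySem.Chars.isIn_iff_infix]
    exact ((PySem.Chars.startswith_iff (c :: t) sub).mp h).isInfix

-- the position-major scan decides exactly 'some term is a substring'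
theorem spacScan_eq_any_isIn (s : List Char) :
    spacScan s = spacTerms.any (fun term => PySem.Chars.isIn term.toList s) := by
  induction s with
  | nil => decide
  | cons c t ih =>
      show (if spacTerms.any (fun term => PySem.Chars.startswith (c :: t) term.toList) then true
            else spacScan t) = _
      rw [ih]
      have hcons : (spacTerms.any fun term => PySem.Chars.isIn term.toList (c :: t))
          = ((spacTerms.any fun term => PySem.Chars.startswith (c :: t) term.toList)
             || (spacTerms.any fun term => PySem.Chars.isIn term.toList t)) := by
        rw [Bool.eq_iff_iff]
        simp only [List.any_eq_true, Bool.or_eq_true]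
        constructor
        · rintro ⟨x, hx, hh⟩
          rw [spac_isIn_cons] at hh
          rcases Bool.or_eq_true_iff.mp hh with h1 | h2
          · exact Or.inl ⟨x, hx, h1⟩
          · exact Or.inr ⟨x, hx, h2⟩
        · rintro (⟨x, hx, hh⟩ | ⟨x, hx, hh⟩) <;>
            exact ⟨x, hx, by rw [spac_isIn_cons]; simp [hh]⟩
      rw [hcons]
      cases h : spacTerms.any (fun term => PySem.Chars.startswith (c :: t) term.toList) <;>
        simp [h]

-- ===== VERDICT (by name: the statement is the Claim_ definition above) =====
theorem identify_potential_spac_spec : Claim_equal_identify_potential_spac := by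
  intro description _
  show identify_potential_spac description = identify_potential_spac_alt description
  unfold identify_potential_spac identify_potential_spac_alt
  rw [spacScan_eq_any_isIn]
  by_cases hd : description.toList.isEmpty
  · rw [if_pos hd]
    have : (PySem.Str.upper description).toList = [] := by
      rw [PySem.Str.toList_upper, PySem.Chars.upper]
      simp [List.isEmpty_iff.mp hd]
    rw [this]
    have : (spacTerms.any fun term => PySem.Chars.isIn term.toList []) = false := by decide
    simp [this]
  · rw [if_neg hd]
    have hsplit : spacTerms = spac_keywords ++ spac_sponsors := by decide
    rw [hsplit, List.any_append]
    simp only [PySem.Str.isIn_eq]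
    split_ifs with h1 h2 <;> simp_all
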